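-- pv_equiv track=rewrite | github.com/Smital25/AI-Agents | AGENTNEW/backend/ontology.py | map_topics
-- ===== SOURCE A (Python) =====
-- CCS = {
--     "machine learning": ["supervised learning", "unsupervised learning", "reinforcement learning"],
--     "natural language processing": ["information extraction", "question answering", "summarization"],
--     "computer vision": ["object detection", "segmentation", "image classification"],
-- }
--
-- def map_topics(keywords):
--     tags = set()
--     for k in keywords:
--         k = k.lower()
--         for root, subs in CCS.items():
--             if k == root or k in subs:
--                 tags.add(root)
--     return sorted(tags)
-- ===== SOURCE B (Python) =====
-- # Reverse index precomputed once: each root and each sub-term maps to its root;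
-- # map_topics becomes a single pass with O(1) lookups (no inner scan over CCS).
-- ONTOLOGY_INDEX = {
--     "machine learning": "machine learning",
--     "supervised learning": "machine learning",
--     "unsupervised learning": "machine learning",
--     "reinforcement learning": "machine learning",
--     "natural language processing": "natural language processing",
--     "information extraction": "natural language processing",
--     "question answering": "natural language processing",
--     "summarization": "natural language processing",
--     "computer vision": "computer vision",
--     "object detection": "computer vision",
--     "segmentation": "computer vision",
--     "image classification": "computer vision",
-- }
--
-- def map_topics(keywords):
--     tags = set()
--     for k in keywords:
--         root = ONTOLOGY_INDEX.get(k.lower())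
--         if root is not None:
--             tags.add(root)
--     return sorted(tags)
-- ===== Notes on version B (the rewrite author's own statement) =====
-- stated objective: idiomatic
-- what changed: Replaced the nested scan over CCS (per keyword, per root, list membership test) by a reverse index dict built once that maps every root and sub-term to its root, so each keyword becomes a single dict lookup.
import Mathlib
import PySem

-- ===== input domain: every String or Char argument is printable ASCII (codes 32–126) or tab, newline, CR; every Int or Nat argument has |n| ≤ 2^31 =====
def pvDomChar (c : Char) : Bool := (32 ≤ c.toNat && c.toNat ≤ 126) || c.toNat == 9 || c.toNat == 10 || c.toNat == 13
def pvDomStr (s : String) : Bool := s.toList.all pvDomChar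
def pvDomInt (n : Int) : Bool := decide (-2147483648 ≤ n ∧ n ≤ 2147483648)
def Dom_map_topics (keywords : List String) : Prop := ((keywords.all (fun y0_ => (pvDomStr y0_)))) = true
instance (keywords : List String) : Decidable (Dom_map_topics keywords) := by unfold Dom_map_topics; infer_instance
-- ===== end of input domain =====

-- B replaces A's nested scan over CCS with a reverse-index dict built once (idiomatic, one lookup per keyword).

-- ===== PORT A =====
def CCS : List (String × List String) :=
  [("machine learning", ["supervised learning", "unsupervised learning", "reinforcement learning"]),
   ("natural language processing", ["information extraction", "question answering", "summarization"]),
   ("computer vision", ["object detection", "segmentation", "image classification"])]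

def map_topics (keywords : List String) : List String :=
  let tags : PySem.Set String :=
    keywords.foldl (fun tags k0 =>
      let k := PySem.Str.lower k0
      CCS.foldl (fun tags rs =>
        if k = rs.1 ∨ k ∈ rs.2 then PySem.Set.add tags rs.1 else tags) tags) PySem.Set.empty
  PySem.List.sorted tags (fun x => x) false

-- ===== PORT B =====
def ONTOLOGY_INDEX : PySem.Dict String String :=
  PySem.Dict.ofList
    [("machine learning", "machine learning"),
     ("supervised learning", "machine learning"),
     ("unsupervised learning", "machine learning"),
     ("reinforcement learning", "machine learning"),
     ("natural language processing", "natural language processing"),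
     ("information extraction", "natural language processing"),
     ("question answering", "natural language processing"),
     ("summarization", "natural language processing"),
     ("computer vision", "computer vision"),
     ("object detection", "computer vision"),
     ("segmentation", "computer vision"),
     ("image classification", "computer vision")]

def map_topics_alt (keywords : List String) : List String :=
  let tags : PySem.Set String :=
    keywords.foldl (fun tags k0 =>
      match ONTOLOGY_INDEX.get? (PySem.Str.lower k0) with
      | some root => PySem.Set.add tags root
      | none => tags) PySem.Set.empty
  PySem.List.sorted tags (fun x => x) false

-- ===== PRECONDITION & SPEC =====
def Spec_map_topics (keywords : List String) (out : List String) : Prop := out = map_topics_alt keywords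
instance (keywords : List String) (out : List String) : Decidable (Spec_map_topics keywords out) := by unfold Spec_map_topics; infer_instance

-- ===== CLAIM (what is proved, stated in full; the proofs are below) =====
def Claim_equal_map_topics : Prop := ∀ (keywords : List String), Dom_map_topics keywords → Spec_map_topics keywords (map_topics keywords)

-- ===== LEMMAS AND PROOFS =====

-- Per-keyword step: A's scan over CCS adds exactly the root that B's reverse index returns.
theorem ccs_scan_eq_index (tags : PySem.Set String) (k : String) :
    CCS.foldl (fun tags rs =>
        if k = rs.1 ∨ k ∈ rs.2 then PySem.Set.add tags rs.1 else tags) tags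
    = match ONTOLOGY_INDEX.get? k with
      | some root => PySem.Set.add tags root
      | none => tags := by
  by_cases h1 : k = "machine learning"
  · subst h1; rfl
  by_cases h2 : k = "supervised learning"
  · subst h2; rfl
  by_cases h3 : k = "unsupervised learning"
  · subst h3; rfl
  by_cases h4 : k = "reinforcement learning"
  · subst h4; rfl
  by_cases h5 : k = "natural language processing"
  · subst h5; rfl
  by_cases h6 : k = "information extraction"
  · subst h6; rfl
  by_cases h7 : k = "question answering"
  · subst h7; rfl
  by_cases h8 : k = "summarization"
  · subst h8; rfl
  by_cases h9 : k = "computer vision"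
  · subst h9; rfl
  by_cases h10 : k = "object detection"
  · subst h10; rfl
  by_cases h11 : k = "segmentation"
  · subst h11; rfl
  by_cases h12 : k = "image classification"
  · subst h12; rfl
  simp [CCS, ONTOLOGY_INDEX, PySem.Dict.get?, PySem.Dict.ofList, PySem.Dict.update,
        PySem.Dict.insert, PySem.Dict.contains, PySem.Dict.empty, List.find?,
        h1, h2, h3, h4, h5, h6, h7, h8, h9, h10, h11, h12,
        beq_eq_false_iff_ne.mpr (Ne.symm h1), beq_eq_false_iff_ne.mpr (Ne.symm h2),
        beq_eq_false_iff_ne.mpr (Ne.symm h3), beq_eq_false_iff_ne.mpr (Ne.symm h4),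
        beq_eq_false_iff_ne.mpr (Ne.symm h5), beq_eq_false_iff_ne.mpr (Ne.symm h6),
        beq_eq_false_iff_ne.mpr (Ne.symm h7), beq_eq_false_iff_ne.mpr (Ne.symm h8),
        beq_eq_false_iff_ne.mpr (Ne.symm h9), beq_eq_false_iff_ne.mpr (Ne.symm h10),
        beq_eq_false_iff_ne.mpr (Ne.symm h11), beq_eq_false_iff_ne.mpr (Ne.symm h12)]

-- ===== VERDICT (by name: the statement is the Claim_ definition above) =====
theorem map_topics_spec : Claim_equal_map_topics := by
  intro keywords _
  unfold Spec_map_topics map_topics map_topics_alt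
  have hfold :
      keywords.foldl (fun tags k0 =>
        let k := PySem.Str.lower k0
        CCS.foldl (fun tags rs =>
          if k = rs.1 ∨ k ∈ rs.2 then PySem.Set.add tags rs.1 else tags) tags) PySem.Set.empty
      = keywords.foldl (fun tags k0 =>
          match ONTOLOGY_INDEX.get? (PySem.Str.lower k0) with
          | some root => PySem.Set.add tags root
          | none => tags) PySem.Set.empty := by
    have : (fun (tags : PySem.Set String) (k0 : String) =>
        CCS.foldl (fun tags rs =>
          if PySem.Str.lower k0 = rs.1 ∨ PySem.Str.lower k0 ∈ rs.2 then PySem.Set.add tags rs.1 else tags) tags)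
      = (fun (tags : PySem.Set String) (k0 : String) =>
          match ONTOLOGY_INDEX.get? (PySem.Str.lower k0) with
          | some root => PySem.Set.add tags root
          | none => tags) := by
      funext tags k0
      exact ccs_scan_eq_index tags (PySem.Str.lower k0)
    simpa using congrFun (congrArg (fun f => List.foldl f (PySem.Set.empty : PySem.Set String)) this) keywords
  simp only [hfold]
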